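-- pv_equiv track=rewrite | github.com/RitishaShrestha08/Foundation-of-Computer-Science | heruistic.py | solve
-- ===== SOURCE A (Python) =====
-- friends = {
--     "A": ["B"],
--     "B": ["A"],
--     "C": ["D"],
--     "D": ["C"]
-- }
--
-- city = {
--     "A": "Kathmandu",
--     "B": "Pokhara",
--     "C": "Kathmandu",
--     "D": "Biratnagar"
-- }
--
-- def is_valid(arrangement):
--     for i in range(len(arrangement) - 1):
--         s1 = arrangement[i]
--         s2 = arrangement[i + 1]
--
--         # Rule 1: Friends cannot sit together
--         if s2 in friends[s1]:
--             return False
--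
--         # Rule 2: Same city cannot sit together
--         if city[s1] == city[s2]:
--             return False
--
--     return True
--
-- def solve(arrangement, remaining):
--     if not remaining:
--         return arrangement
--
--     for student in remaining:
--         new_arr = arrangement + [student]
--         if is_valid(new_arr):
--             result = solve(new_arr, [s for s in remaining if s != student])
--             if result:
--                 return result
--
--     return None
-- ===== SOURCE B (Python) =====
-- friends = {
--     "A": ["B"],
--     "B": ["A"],
--     "C": ["D"],
--     "D": ["C"]
-- }
--
-- city = {
--     "A": "Kathmandu",
--     "B": "Pokhara",
--     "C": "Kathmandu",
--     "D": "Biratnagar"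
-- }
--
-- def is_valid(arrangement):
--     for i in range(len(arrangement) - 1):
--         s1 = arrangement[i]
--         s2 = arrangement[i + 1]
--         if s2 in friends[s1]:
--             return False
--         if city[s1] == city[s2]:
--             return False
--     return True
--
-- def solve(arrangement, remaining):
--     # Iterative depth-first search with an explicit stack instead of recursion.
--     stack = [(arrangement, remaining)]
--     while stack:
--         arr, rem = stack.pop()
--         if not rem:
--             return arr
--         for student in reversed(rem):
--             new_arr = arr + [student]
--             if is_valid(new_arr):
--                 stack.append((new_arr, [s for s in rem if s != student]))
--     return None
-- ===== Notes on version B (the rewrite author's own statement) =====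
-- stated objective: alternative
-- what changed: Recursive backtracking with an in-loop early return is replaced by an iterative DFS driven by an explicit stack of (arrangement, remaining) states, children pushed in reverse to preserve search order.
import Mathlib
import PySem

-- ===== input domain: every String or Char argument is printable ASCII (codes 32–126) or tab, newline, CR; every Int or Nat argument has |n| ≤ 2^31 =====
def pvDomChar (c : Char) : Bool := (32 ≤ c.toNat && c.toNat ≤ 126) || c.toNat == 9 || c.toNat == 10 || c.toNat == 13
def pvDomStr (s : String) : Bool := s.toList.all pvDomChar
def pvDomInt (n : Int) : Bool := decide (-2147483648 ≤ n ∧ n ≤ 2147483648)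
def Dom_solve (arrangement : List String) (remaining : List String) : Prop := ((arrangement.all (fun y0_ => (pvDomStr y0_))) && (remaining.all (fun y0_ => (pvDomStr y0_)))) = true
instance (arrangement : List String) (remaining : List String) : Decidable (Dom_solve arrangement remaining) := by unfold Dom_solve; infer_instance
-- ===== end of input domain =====

-- B replaces A's recursive backtracking by an iterative DFS over an explicit stack of
-- (arrangement, remaining) states (children pushed in reverse to keep A's search order);
-- return values only are compared (neither version mutates its arguments observably).

-- ===== PORT A =====
def friendsD : PySem.Dict String (List String) :=
  PySem.Dict.ofList [("A", ["B"]), ("B", ["A"]), ("C", ["D"]), ("D", ["C"])]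

def cityD : PySem.Dict String String :=
  PySem.Dict.ofList [("A", "Kathmandu"), ("B", "Pokhara"), ("C", "Kathmandu"), ("D", "Biratnagar")]

-- friends[s] / city[s] are ported with .getD: exact on every input admitted by Pre_solve,
-- where each student looked up is a key (Python raises KeyError otherwise); the two indices
-- of the range loop are always in range, so .getD "" after pyGet? is exact too.
def is_valid (arrangement : List String) : Bool :=
  (PySem.List.pyRange 0 ((arrangement.length : Int) - 1) 1).all (fun i =>
    let s1 := (PySem.List.pyGet? arrangement i).getD ""
    let s2 := (PySem.List.pyGet? arrangement (i + 1)).getD ""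
    !((friendsD.getD s1 []).contains s2) && !(cityD.getD s1 "" == cityD.getD s2 ""))

def solve (arrangement : List String) (remaining : List String) : Option (List String) :=
  if _h : remaining = [] then some arrangement
  else
    -- the for-loop with early returns: first student whose branch yields a truthy result
    remaining.attach.findSome? (fun st =>
      let student := st.1
      let new_arr := arrangement ++ [student]
      if is_valid new_arr then
        match solve new_arr (remaining.filter (fun s => s != student)) with
        | some result => if result = [] then none else some result   -- 'if result:' — [] is falsy
        | none => none
      else none)
termination_by remaining.length
decreasing_by
  simp
  exact st.2

-- ===== PORT B =====
def pushChildren (arr : List String) (rem : List String)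
    (stk : List (List String × List String)) : List (List String × List String) :=
  rem.reverse.foldl (fun st student =>
    let new_arr := arr ++ [student]
    if is_valid new_arr then (new_arr, rem.filter (fun s => s != student)) :: st else st) stk

-- fuel totalizes the while-loop; fBound remaining.length is proved sufficient below
def fBound : Nat → Nat
  | 0 => 1
  | n + 1 => 1 + (n + 1) * fBound n

def loopB : Nat → List (List String × List String) → Option (List String)
  | _, [] => none
  | 0, _ :: _ => none
  | fuel + 1, (arr, rem) :: stk =>
      if rem = [] then some arr
      else loopB fuel (pushChildren arr rem stk)

def solve_alt (arrangement : List String) (remaining : List String) : Option (List String) :=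
  loopB (fBound remaining.length) [(arrangement, remaining)]

-- ===== PRECONDITION & SPEC =====
-- data of the module-level friends/city dictionaries, restated for the precondition only
def preKnown (s : String) : Bool := s == "A" || s == "B" || s == "C" || s == "D"
def preFriendPair (s1 s2 : String) : Bool :=
  (s1 == "A" && s2 == "B") || (s1 == "B" && s2 == "A") ||
  (s1 == "C" && s2 == "D") || (s1 == "D" && s2 == "C")
def preCity (s : String) : String :=
  if s == "B" then "Pokhara" else if s == "D" then "Biratnagar" else "Kathmandu"

-- the arrangement already contains, inside a prefix of known students, an adjacent pair that
-- breaks a rule (checked left to right, rule 1 before rule 2, as what A evaluates before raising)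
def prefixBlocked (arrangement : List String) : Bool :=
  (List.range arrangement.length).any (fun i =>
    decide (i + 1 < arrangement.length) &&
    (List.range (i + 1)).all (fun j => preKnown (arrangement.getD j "")) &&
    (preFriendPair (arrangement.getD i "") (arrangement.getD (i + 1) "") ||
     (preKnown (arrangement.getD (i + 1) "") &&
      preCity (arrangement.getD i "") == preCity (arrangement.getD (i + 1) ""))))

-- Pre_ excludes exactly the inputs on which A's dict lookups reach a student outside the four
-- known keys and raise KeyError: it admits any input whose students are all known, plus the
-- shapes on which A returns without ever looking up an unknown student (empty remaining;
-- empty arrangement with all-equal remaining; an arrangement whose known prefix already breaks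
-- a rule, so every branch is pruned before an unknown lookup and A returns None).
def Pre_solve (arrangement : List String) (remaining : List String) : Prop :=
  remaining = [] ∨
  (arrangement = [] ∧ ∀ t ∈ remaining, t = remaining.headD "") ∨
  prefixBlocked arrangement = true ∨
  ((∀ s ∈ arrangement, preKnown s = true) ∧ (∀ s ∈ remaining, preKnown s = true))
instance (arrangement : List String) (remaining : List String) : Decidable (Pre_solve arrangement remaining) := by
  unfold Pre_solve; infer_instance

def pvWitness_solve : List String × List String := ([], ["A", "C"])

def Spec_solve (arrangement : List String) (remaining : List String) (out : Option (List String)) : Prop := out = solve_alt arrangement remaining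
instance (arrangement : List String) (remaining : List String) (out : Option (List String)) : Decidable (Spec_solve arrangement remaining out) := by unfold Spec_solve; infer_instance

-- ===== CLAIM (what is proved, stated in full; the proofs are below) =====
def Claim_equal_solve : Prop := ∀ (arrangement : List String) (remaining : List String), Dom_solve arrangement remaining → Pre_solve arrangement remaining → Spec_solve arrangement remaining (solve arrangement remaining)

-- ===== LEMMAS AND PROOFS =====

-- the per-student branch body of A's loop
def branchG (arr rem : List String) (student : String) : Option (List String) :=
  if is_valid (arr ++ [student]) then
    match solve (arr ++ [student]) (rem.filter (fun s => s != student)) with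
    | some result => if result = [] then none else some result
    | none => none
  else none

-- the child states B pushes, in search order
def childList (arr rem : List String) : List (List String × List String) :=
  rem.filterMap (fun student =>
    if is_valid (arr ++ [student]) then
      some (arr ++ [student], rem.filter (fun s => s != student))
    else none)

-- sequential DFS value of a whole stack
def runSpec : List (List String × List String) → Option (List String)
  | [] => none
  | (arr, rem) :: tl =>
      match solve arr rem with
      | some r => some r
      | none => runSpec tl

def stackCost (stk : List (List String × List String)) : Nat :=
  (stk.map (fun p => fBound p.2.length)).sum

theorem fBound_pos (n : Nat) : 1 ≤ fBound n := by
  cases n <;> simp [fBound]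

theorem fBound_le_succ (n : Nat) : fBound n ≤ fBound (n + 1) := by
  have h := fBound_pos n
  simp only [fBound]
  nlinarith

theorem fBound_mono {a b : Nat} (h : a ≤ b) : fBound a ≤ fBound b := by
  induction h with
  | refl => exact le_rfl
  | step _ ih => exact ih.trans (fBound_le_succ _)

theorem pushChildren_eq (arr rem : List String) :
    ∀ (l : List String) (stk : List (List String × List String)),
      l.reverse.foldl (fun st student =>
        if is_valid (arr ++ [student]) then
          (arr ++ [student], rem.filter (fun s => s != student)) :: st
        else st) stk
      = (l.filterMap (fun student =>
          if is_valid (arr ++ [student]) then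
            some (arr ++ [student], rem.filter (fun s => s != student))
          else none)) ++ stk := by
  intro l
  induction l with
  | nil => intro stk; rfl
  | cons x xs ih =>
      intro stk
      simp only [List.reverse_cons, List.foldl_append, List.foldl_cons, List.foldl_nil, ih,
        List.filterMap_cons]
      by_cases h : is_valid (arr ++ [x]) <;> simp [h]

theorem pushChildren_eq_childList (arr rem : List String)
    (stk : List (List String × List String)) :
    pushChildren arr rem stk = childList arr rem ++ stk := by
  unfold pushChildren childList
  exact pushChildren_eq arr rem rem stk

theorem solve_nil (arr : List String) : solve arr [] = some arr := by
  unfold solve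
  rfl

theorem solve_ne_nil (arr rem : List String) (hrem : rem ≠ []) :
    solve arr rem = rem.findSome? (branchG arr rem) := by
  conv_lhs => rw [solve.eq_def]
  rw [dif_neg hrem]
  have h1 : rem.findSome? (branchG arr rem)
      = (rem.attach.map Subtype.val).findSome? (branchG arr rem) := by
    rw [List.attach_map_subtype_val]
  rw [h1, List.findSome?_map]
  rfl

theorem solve_length : ∀ (n : Nat) (arr rem r : List String),
    rem.length ≤ n → solve arr rem = some r → arr.length ≤ r.length := by
  intro n
  induction n with
  | zero =>
      intro arr rem r h hs
      have : rem = [] := List.eq_nil_of_length_eq_zero (Nat.le_zero.mp h)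
      subst this
      rw [solve_nil] at hs
      cases hs
      exact le_rfl
  | succ n ih =>
      intro arr rem r h hs
      by_cases hrem : rem = []
      · subst hrem; rw [solve_nil] at hs; cases hs; exact le_rfl
      · rw [solve_ne_nil arr rem hrem] at hs
        obtain ⟨s, hmem, hval⟩ := List.exists_of_findSome?_eq_some hs
        unfold branchG at hval
        by_cases hv : is_valid (arr ++ [s])
        · rw [if_pos hv] at hval
          cases hsolve : solve (arr ++ [s]) (rem.filter (fun t => t != s)) with
          | none =>
              rw [hsolve] at hval
              exact absurd hval (by simp)
          | some result =>
              rw [hsolve] at hval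
              have hval' : (if result = [] then none else some result : Option (List String))
                  = some r := hval
              by_cases hres : result = []
              · rw [if_pos hres] at hval'; cases hval'
              · rw [if_neg hres] at hval'
                cases hval'
                have hlt : (rem.filter (fun t => t != s)).length < rem.length :=
                  List.length_filter_lt_length_iff_exists.mpr ⟨s, hmem, by simp⟩
                have := ih (arr ++ [s]) (rem.filter (fun t => t != s)) r
                  (by omega) hsolve
                simp only [List.length_append, List.length_cons, List.length_nil] at this
                omega
        · rw [if_neg hv] at hval; cases hval

theorem runSpec_append (l1 l2 : List (List String × List String)) :
    runSpec (l1 ++ l2)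
      = match runSpec l1 with
        | some r => some r
        | none => runSpec l2 := by
  induction l1 with
  | nil => simp [runSpec]
  | cons p tl ih =>
      obtain ⟨arr, rem⟩ := p
      simp only [List.cons_append, runSpec, ih]
      cases solve arr rem <;> rfl

theorem runSpec_childList (arr rem : List String) :
    ∀ (l : List String),
      runSpec (l.filterMap (fun student =>
        if is_valid (arr ++ [student]) then
          some (arr ++ [student], rem.filter (fun s => s != student))
        else none))
      = l.findSome? (branchG arr rem) := by
  intro l
  induction l with
  | nil => rfl
  | cons s tl ih =>
      simp only [List.filterMap_cons, List.findSome?_cons]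
      by_cases hv : is_valid (arr ++ [s])
      · rw [if_pos hv]
        unfold branchG
        rw [if_pos hv]
        cases hsolve : solve (arr ++ [s]) (rem.filter (fun t => t != s)) with
        | none => simpa [runSpec, hsolve] using ih
        | some result =>
            have hres : result ≠ [] := by
              have hlen := solve_length (rem.filter (fun t => t != s)).length
                (arr ++ [s]) (rem.filter (fun t => t != s)) result le_rfl hsolve
              intro hcontra
              subst hcontra
              simp at hlen
            simp [runSpec, hsolve, hres]
      · rw [if_neg hv]
        unfold branchG
        rw [if_neg hv]
        exact ih

theorem childCost_le (arr rem : List String) :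
    ∀ (l : List String), (∀ s ∈ l, s ∈ rem) →
      stackCost (l.filterMap (fun student =>
        if is_valid (arr ++ [student]) then
          some (arr ++ [student], rem.filter (fun s => s != student))
        else none))
      ≤ l.length * fBound (rem.length - 1) := by
  intro l
  induction l with
  | nil => intro _; simp [stackCost]
  | cons s tl ih =>
      intro hsub
      have hmem : s ∈ rem := hsub s List.mem_cons_self
      have htl : ∀ t ∈ tl, t ∈ rem := fun t ht => hsub t (List.mem_cons_of_mem s ht)
      have hrec := ih htl
      simp only [List.filterMap_cons, List.length_cons]
      by_cases hv : is_valid (arr ++ [s])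
      · rw [if_pos hv]
        have hlt : (rem.filter (fun t => t != s)).length < rem.length :=
          List.length_filter_lt_length_iff_exists.mpr ⟨s, hmem, by simp⟩
        have hone : fBound (rem.filter (fun t => t != s)).length ≤ fBound (rem.length - 1) :=
          fBound_mono (by omega)
        simp only [stackCost, List.map_cons, List.sum_cons] at hrec ⊢
        have : (tl.length + 1) * fBound (rem.length - 1)
            = tl.length * fBound (rem.length - 1) + fBound (rem.length - 1) := by ring
        omega
      · rw [if_neg hv]
        calc stackCost _ ≤ tl.length * fBound (rem.length - 1) := hrec
          _ ≤ (tl.length + 1) * fBound (rem.length - 1) := by nlinarith [fBound_pos (rem.length - 1)]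

theorem stackCost_append (l1 l2 : List (List String × List String)) :
    stackCost (l1 ++ l2) = stackCost l1 + stackCost l2 := by
  simp [stackCost]

theorem stackCost_decrease (arr rem : List String) (hrem : rem ≠ [])
    (stk : List (List String × List String)) :
    stackCost (childList arr rem ++ stk) < stackCost ((arr, rem) :: stk) := by
  obtain ⟨k, hk⟩ : ∃ k, rem.length = k + 1 := by
    cases rem with
    | nil => exact absurd rfl hrem
    | cons a l => exact ⟨l.length, rfl⟩
  have hchild : stackCost (childList arr rem) ≤ rem.length * fBound (rem.length - 1) :=
    childCost_le arr rem rem (fun _ h => h)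
  rw [stackCost_append]
  have hcons : stackCost ((arr, rem) :: stk) = fBound rem.length + stackCost stk := by
    simp [stackCost]
  rw [hcons, hk] at *
  simp only [fBound, Nat.add_sub_cancel] at *
  omega

theorem loopB_eq : ∀ (fuel : Nat) (stk : List (List String × List String)),
    stackCost stk ≤ fuel → loopB fuel stk = runSpec stk := by
  intro fuel
  induction fuel with
  | zero =>
      intro stk h
      cases stk with
      | nil => rfl
      | cons p tl =>
          exfalso
          have : 1 ≤ stackCost (p :: tl) := by
            simp only [stackCost, List.map_cons, List.sum_cons]
            have := fBound_pos p.2.length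
            omega
          omega
  | succ fuel ih =>
      intro stk h
      cases stk with
      | nil => rfl
      | cons p tl =>
          obtain ⟨arr, rem⟩ := p
          by_cases hrem : rem = []
          · subst hrem
            simp [loopB, runSpec, solve_nil]
          · have hstep : loopB (fuel + 1) ((arr, rem) :: tl)
                = loopB fuel (pushChildren arr rem tl) := by
              simp [loopB, hrem]
            rw [hstep, pushChildren_eq_childList]
            have hlt := stackCost_decrease arr rem hrem tl
            rw [ih _ (by omega), runSpec_append]
            have hchild : runSpec (childList arr rem) = solve arr rem := by
              unfold childList
              rw [runSpec_childList arr rem rem, ← solve_ne_nil arr rem hrem]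
            rw [hchild]
            simp only [runSpec]

-- ===== VERDICT (by name: the statement is the Claim_ definition above) =====
theorem solve_spec : Claim_equal_solve := by
  intro arrangement remaining _ _
  unfold Spec_solve solve_alt
  have h : stackCost [(arrangement, remaining)] ≤ fBound remaining.length := by
    simp [stackCost]
  rw [loopB_eq _ _ h]
  simp only [runSpec]
  cases solve arrangement remaining <;> rfl
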